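-- pv_equiv track=rewrite | github.com/shevescode/roguelike-game-python | engine.py | check_player_position
-- ===== SOURCE A (Python) =====
-- def check_player_position(board):
--     player_x, player_y = -1, -1
--     for x, i in enumerate(board):
--         for y, j in enumerate(i):
--             if j == "@":
--                 player_x = x
--                 player_y = y
--     return player_x, player_y
-- ===== SOURCE B (Python) =====
-- def check_player_position(board):
--     for x in range(len(board) - 1, -1, -1):
--         row = board[x]
--         for y in range(len(row) - 1, -1, -1):
--             if row[y] == "@":
--                 return x, y
--     return -1, -1
-- ===== Notes on version B (the rewrite author's own statement) =====
-- stated objective: alternative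
-- what changed: Replaces the full overwriting row-major scan with a reverse index scan (rows last-to-first, columns last-to-first) that returns the first '@' found, i.e. early termination instead of overwriting a running result.
import Mathlib
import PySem

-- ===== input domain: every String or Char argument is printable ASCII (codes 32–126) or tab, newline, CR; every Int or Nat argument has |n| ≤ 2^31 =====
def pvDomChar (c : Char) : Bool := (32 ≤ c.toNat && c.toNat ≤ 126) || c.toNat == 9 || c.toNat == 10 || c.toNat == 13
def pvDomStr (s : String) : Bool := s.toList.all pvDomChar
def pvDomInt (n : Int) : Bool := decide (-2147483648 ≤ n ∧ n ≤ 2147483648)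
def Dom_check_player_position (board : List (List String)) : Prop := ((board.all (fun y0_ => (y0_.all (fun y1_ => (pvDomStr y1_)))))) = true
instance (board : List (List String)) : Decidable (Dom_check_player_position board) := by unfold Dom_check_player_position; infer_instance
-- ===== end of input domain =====

-- B replaces A's full overwriting row-major scan by a reverse index scan returning the first '@' found (same value, early termination); same asymptotic cost.


-- ===== PORT A =====
-- literal port: fold over enumerate(board), inner fold over enumerate(row), overwriting (player_x, player_y)
def check_player_position (board : List (List String)) : Int × Int :=
  (PySem.List.enumerate board).foldl
    (fun s xi =>
      (PySem.List.enumerate xi.2).foldl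
        (fun s' yj => if yj.2 = "@" then (xi.1, yj.1) else s') s)
    (-1, -1)

-- ===== PORT B =====
-- B's reverse index loops (range(len-1,-1,-1)) are ported as structural recursion over the
-- reversed enumerated lists: same cells, same order, same early return.
def cppScanRow (x : Int) : List (Int × String) → Option (Int × Int)
  | [] => none
  | (y, c) :: rest => if c = "@" then some (x, y) else cppScanRow x rest

def cppScanRows : List (Int × List String) → Option (Int × Int)
  | [] => none
  | (x, row) :: rest =>
    match cppScanRow x (PySem.List.enumerate row).reverse with
    | some p => some p
    | none => cppScanRows rest

def check_player_position_alt (board : List (List String)) : Int × Int :=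
  (cppScanRows (PySem.List.enumerate board).reverse).getD (-1, -1)

-- ===== PRECONDITION & SPEC =====
def Spec_check_player_position (board : List (List String)) (out : Int × Int) : Prop := out = check_player_position_alt board
instance (board : List (List String)) (out : Int × Int) : Decidable (Spec_check_player_position board out) := by unfold Spec_check_player_position; infer_instance

-- ===== CLAIM (what is proved, stated in full; the proofs are below) =====
def Claim_equal_check_player_position : Prop := ∀ (board : List (List String)), Dom_check_player_position board → Spec_check_player_position board (check_player_position board)

-- ===== LEMMAS AND PROOFS =====

theorem cppScanRow_append (x : Int) (l₁ l₂ : List (Int × String)) :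
    cppScanRow x (l₁ ++ l₂) = (cppScanRow x l₁).or (cppScanRow x l₂) := by
  induction l₁ with
  | nil => simp [cppScanRow]
  | cons h t ih =>
    obtain ⟨y, c⟩ := h
    simp only [List.cons_append, cppScanRow, ih]
    split <;> simp

theorem cppScanRows_append (l₁ l₂ : List (Int × List String)) :
    cppScanRows (l₁ ++ l₂) = (cppScanRows l₁).or (cppScanRows l₂) := by
  induction l₁ with
  | nil => simp [cppScanRows]
  | cons h t ih =>
    obtain ⟨x, row⟩ := h
    simp only [List.cons_append, cppScanRows, ih]
    split <;> simp

theorem inner_fold_eq (x : Int) (l : List (Int × String)) (init : Int × Int) :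
    l.foldl (fun s' yj => if yj.2 = "@" then (x, yj.1) else s') init
      = (cppScanRow x l.reverse).getD init := by
  induction l generalizing init with
  | nil => simp [cppScanRow]
  | cons h t ih =>
    obtain ⟨y, c⟩ := h
    simp only [List.foldl_cons, List.reverse_cons, cppScanRow_append, ih]
    by_cases hc : c = "@" <;> cases hr : cppScanRow x t.reverse <;>
      simp [cppScanRow, hc]

theorem outer_fold_eq (l : List (Int × List String)) (init : Int × Int) :
    l.foldl
      (fun s xi =>
        (PySem.List.enumerate xi.2).foldl
          (fun s' yj => if yj.2 = "@" then (xi.1, yj.1) else s') s) init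
      = (cppScanRows l.reverse).getD init := by
  induction l generalizing init with
  | nil => simp [cppScanRows]
  | cons h t ih =>
    obtain ⟨x, row⟩ := h
    rw [List.foldl_cons, ih, inner_fold_eq, List.reverse_cons, cppScanRows_append]
    cases hr : cppScanRows t.reverse <;>
      cases hs : cppScanRow x (PySem.List.enumerate row).reverse <;>
      simp [cppScanRows, hs]

-- ===== VERDICT (by name: the statement is the Claim_ definition above) =====
theorem check_player_position_spec : Claim_equal_check_player_position := by
  intro board _
  unfold Spec_check_player_position check_player_position check_player_position_alt
  exact outer_fold_eq _ _
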